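-- pv_equiv track=rewrite | github.com/bond005/ru_llm_instruct | ner/nerel.py | find_entity_for_token
-- ===== SOURCE A (Python) =====
-- from typing import Dict, List, Tuple
--
-- def find_entity_for_token(text: str, token_start: int, token_end: int,
--                           entities: Dict[str, List[Tuple[int, int]]]) -> List[Tuple[str, int]]:
--     found_entities = []
--     for ne_class in sorted(list(entities.keys())):
--         for ne_idx, (ne_start, ne_end) in enumerate(entities[ne_class]):
--             if (token_start >= ne_start) and (token_end <= ne_end):
--                 found_entities.append((ne_class, ne_idx))
--             else:
--                 if (token_start <= ne_start) and (token_end >= ne_end):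
--                     ok = False
--                 elif (token_start <= ne_start) and (token_end > ne_start):
--                     ok = False
--                 elif (token_start < ne_end) and (token_end > ne_end):
--                     ok = False
--                 else:
--                     ok = True
--                 if not ok:
--                     err_msg = (f'The token ({token_start}, {token_end}) {text[token_start:token_end]} '
--                                f'does not correspond to the named entity ({ne_class}, {ne_start}, {ne_end}) '
--                                f'{text[ne_start:ne_end]}.')
--                     raise ValueError(err_msg)
--     if len(found_entities) > 0:
--         found_entities.sort(key=lambda it: (entities[it[0]][it[1]][0], it[0], entities[it[0]][it[1]][1]))
--     return found_entities
-- ===== SOURCE B (Python) =====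
-- def find_entity_for_token(text: str, token_start: int, token_end: int,
--                           entities):
--     # Flatten all entities into (start, class, end, idx) records, sort them once
--     # lexicographically, then a single ordered scan both validates and collects:
--     # the output comes out already in A's final (start, class, end) order, so no
--     # post-sort of the result is needed.
--     items = [(ne_start, ne_class, ne_end, ne_idx)
--              for ne_class, spans in entities.items()
--              for ne_idx, (ne_start, ne_end) in enumerate(spans)]
--     items.sort()
--     found_entities = []
--     for ne_start, ne_class, ne_end, ne_idx in items:
--         if token_start >= ne_start and token_end <= ne_end:
--             found_entities.append((ne_class, ne_idx))
--         elif not (token_end <= ne_start or token_start >= ne_end):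
--             err_msg = (f'The token ({token_start}, {token_end}) {text[token_start:token_end]} '
--                        f'does not correspond to the named entity ({ne_class}, {ne_start}, {ne_end}) '
--                        f'{text[ne_start:ne_end]}.')
--             raise ValueError(err_msg)
--     return found_entities
-- ===== Notes on version B (the rewrite author's own statement) =====
-- stated objective: alternative
-- what changed: A loops per sorted class collecting matches and then sorts the result by (start, class, end); B instead flattens all entities into (start, class, end, idx) records, sorts that flat list once lexicographically, and does a single scan that validates and collects in final order, so no post-sort of the result is needed.
import Mathlib
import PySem

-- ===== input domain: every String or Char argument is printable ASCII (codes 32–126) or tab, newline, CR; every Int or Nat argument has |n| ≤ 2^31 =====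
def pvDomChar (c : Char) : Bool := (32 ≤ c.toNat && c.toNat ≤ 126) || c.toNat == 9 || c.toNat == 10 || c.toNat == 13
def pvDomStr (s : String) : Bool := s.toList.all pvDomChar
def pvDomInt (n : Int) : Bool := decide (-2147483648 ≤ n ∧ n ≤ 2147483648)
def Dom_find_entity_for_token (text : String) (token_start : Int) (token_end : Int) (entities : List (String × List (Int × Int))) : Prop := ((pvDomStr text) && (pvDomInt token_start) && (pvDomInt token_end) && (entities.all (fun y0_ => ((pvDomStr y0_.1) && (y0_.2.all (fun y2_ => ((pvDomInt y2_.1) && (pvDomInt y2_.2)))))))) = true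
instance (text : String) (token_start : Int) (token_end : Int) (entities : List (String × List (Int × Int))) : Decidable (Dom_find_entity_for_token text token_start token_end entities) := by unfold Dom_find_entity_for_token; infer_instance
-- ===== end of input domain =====

-- B replaces A's per-class collect-then-sort with a different algorithm: flatten every entity into a
-- (start, class, end, idx) record, sort that flat list ONCE lexicographically, and make a single scan
-- that validates and collects — the output is already in A's final order, so A's post-sort disappears.
-- Same return value wherever A returns (objective: alternative, same asymptotic cost).

-- shared modelling of the Python dict argument (assoc list, first-match lookup; keys = distinct keys)
def entGet (entities : List (String × List (Int × Int))) (c : String) : List (Int × Int) :=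
  ((entities.find? (fun p => p.1 == c)).map (·.2)).getD []

def sortedClasses (entities : List (String × List (Int × Int))) : List String :=
  PySem.List.sorted (PySem.List.dedup (entities.map (·.1))) (fun s => s) false

-- A's sort key (entities[it[0]][it[1]][0], it[0], entities[it[0]][it[1]][1]) — Python tuple order = lexicographic
def sortKey (entities : List (String × List (Int × Int))) (it : String × Int) : Lex (Int × Lex (String × Int)) :=
  toLex ((PySem.List.pyGetD (entGet entities it.1) it.2 (0, 0)).1,
         toLex (it.1, (PySem.List.pyGetD (entGet entities it.1) it.2 (0, 0)).2))

-- ===== PORT A =====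
-- inner 'for ne_idx, (ne_start, ne_end) in enumerate(entities[ne_class])' loop; none = ValueError raised
def findA_inner (token_start token_end : Int) (c : String) :
    List (Int × (Int × Int)) → List (String × Int) → Option (List (String × Int))
  | [], acc => some acc
  | (i, (s, e)) :: rest, acc =>
    if token_start ≥ s ∧ token_end ≤ e then
      findA_inner token_start token_end c rest (acc ++ [(c, i)])
    else if (token_start ≤ s ∧ token_end ≥ e) ∨ (token_start ≤ s ∧ token_end > s) ∨
            (token_start < e ∧ token_end > e) then
      none
    else
      findA_inner token_start token_end c rest acc

-- outer 'for ne_class in sorted(list(entities.keys()))' loop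
def findA_outer (entities : List (String × List (Int × Int))) (token_start token_end : Int) :
    List String → List (String × Int) → Option (List (String × Int))
  | [], acc => some acc
  | c :: rest, acc =>
    match findA_inner token_start token_end c (PySem.List.enumerate (entGet entities c)) acc with
    | none => none
    | some acc' => findA_outer entities token_start token_end rest acc'

def find_entity_for_token (text : String) (token_start : Int) (token_end : Int) (entities : List (String × List (Int × Int))) : List (String × Int) :=
  match findA_outer entities token_start token_end (sortedClasses entities) [] with
  | none => []   -- A raises ValueError here (outside Pre_)
  | some found =>
    if found.length > 0 then PySem.List.sorted found (sortKey entities) false else found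

-- ===== PORT B =====
-- Python tuple comparison on the 4-tuples (ne_start, ne_class, ne_end, ne_idx) = nested lexicographic order
def tupKey (q : Int × String × Int × Int) : Lex (Int × Lex (String × Lex (Int × Int))) :=
  toLex (q.1, toLex (q.2.1, toLex (q.2.2.1, q.2.2.2)))

-- the flat list [(ne_start, ne_class, ne_end, ne_idx) for ne_class, spans in entities.items() for …]
def flatItems (entities : List (String × List (Int × Int))) : List (Int × String × Int × Int) :=
  (PySem.List.dedup (entities.map (·.1))).flatMap (fun c =>
    (PySem.List.enumerate (entGet entities c)).map (fun q => (q.2.1, c, q.2.2, q.1)))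

-- 'for ne_start, ne_class, ne_end, ne_idx in items: …' — the single validating/collecting scan; none = ValueError
def scanB (token_start token_end : Int) : List (Int × String × Int × Int) → Option (List (String × Int))
  | [] => some []
  | (s, c, e, i) :: rest =>
    if token_start ≥ s ∧ token_end ≤ e then
      (scanB token_start token_end rest).map (fun l => (c, i) :: l)
    else if ¬(token_end ≤ s ∨ token_start ≥ e) then none
    else scanB token_start token_end rest

def find_entity_for_token_alt (text : String) (token_start : Int) (token_end : Int) (entities : List (String × List (Int × Int))) : List (String × Int) :=
  match scanB token_start token_end (PySem.List.sorted (flatItems entities) tupKey false) with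
  | none => []   -- B raises ValueError here (outside Pre_)
  | some found => found

-- ===== PRECONDITION & SPEC =====
-- Pre_ excludes exactly the inputs on which Python A raises ValueError: some entity partially
-- overlaps the token interval (by A's overlap test).
def Pre_find_entity_for_token (text : String) (token_start : Int) (token_end : Int) (entities : List (String × List (Int × Int))) : Prop :=
  ∀ c ∈ PySem.List.dedup (entities.map (·.1)), ∀ p ∈ entGet entities c,
    (token_start ≥ p.1 ∧ token_end ≤ p.2) ∨
    ¬((token_start ≤ p.1 ∧ token_end ≥ p.2) ∨ (token_start ≤ p.1 ∧ token_end > p.1) ∨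
      (token_start < p.2 ∧ token_end > p.2))
instance (text : String) (token_start : Int) (token_end : Int) (entities : List (String × List (Int × Int))) : Decidable (Pre_find_entity_for_token text token_start token_end entities) := by unfold Pre_find_entity_for_token; infer_instance

def pvWitness_find_entity_for_token : String × Int × Int × (List (String × List (Int × Int))) :=
  ("abcdef", 1, 3, [("PER", [(0, 4), (5, 6)]), ("ORG", [(1, 3)])])

def Spec_find_entity_for_token (text : String) (token_start : Int) (token_end : Int) (entities : List (String × List (Int × Int))) (out : List (String × Int)) : Prop := out = find_entity_for_token_alt text token_start token_end entities
instance (text : String) (token_start : Int) (token_end : Int) (entities : List (String × List (Int × Int))) (out : List (String × Int)) : Decidable (Spec_find_entity_for_token text token_start token_end entities out) := by unfold Spec_find_entity_for_token; infer_instance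

-- ===== CLAIM (what is proved, stated in full; the proofs are below) =====
def Claim_equal_find_entity_for_token : Prop := ∀ (text : String) (token_start : Int) (token_end : Int) (entities : List (String × List (Int × Int))), Dom_find_entity_for_token text token_start token_end entities → Pre_find_entity_for_token text token_start token_end entities → Spec_find_entity_for_token text token_start token_end entities (find_entity_for_token text token_start token_end entities)

-- ===== LEMMAS AND PROOFS =====

-- B's final order as a key on A's (class, idx) pairs: (start, class, end, idx)
def sortKey4 (entities : List (String × List (Int × Int))) (it : String × Int) : Lex (Int × Lex (String × Lex (Int × Int))) :=
  toLex ((PySem.List.pyGetD (entGet entities it.1) it.2 (0, 0)).1,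
    toLex (it.1, toLex ((PySem.List.pyGetD (entGet entities it.1) it.2 (0, 0)).2, it.2)))

-- what one flat record contributes to B's output
def gB (token_start token_end : Int) (q : Int × String × Int × Int) : Option (String × Int) :=
  if token_start ≥ q.1 ∧ token_end ≤ q.2.2.1 then some (q.2.1, q.2.2.2) else none

-- the collection step, as seen from A's per-class traversal
def collectF (token_start token_end : Int) (c : String) (q : Int × (Int × Int)) : Option (String × Int) :=
  if token_start ≥ q.2.1 ∧ token_end ≤ q.2.2 then some (c, q.1) else none

theorem findA_inner_ok (ts te : Int) (c : String) :
    ∀ (l : List (Int × (Int × Int))) (acc : List (String × Int)),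
    (∀ q ∈ l, (ts ≥ q.2.1 ∧ te ≤ q.2.2) ∨
      ¬((ts ≤ q.2.1 ∧ te ≥ q.2.2) ∨ (ts ≤ q.2.1 ∧ te > q.2.1) ∨ (ts < q.2.2 ∧ te > q.2.2))) →
    findA_inner ts te c l acc = some (acc ++ l.filterMap (collectF ts te c))
  | [], acc, _ => by simp [findA_inner]
  | (i, (s, e)) :: rest, acc, h => by
    have hhd := h (i, (s, e)) (by simp)
    have hrest : ∀ q ∈ rest, _ := fun q hq => h q (by simp [hq])
    by_cases hc : ts ≥ s ∧ te ≤ e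
    · simp only [findA_inner, findA_inner_ok ts te c rest _ hrest,
        List.filterMap_cons, collectF, hc]
      simp
    · have hnb : ¬((ts ≤ s ∧ te ≥ e) ∨ (ts ≤ s ∧ te > s) ∨ (ts < e ∧ te > e)) := by
        rcases hhd with h1 | h1
        · exact absurd h1 hc
        · exact h1
      simp only [findA_inner, if_neg hnb,
        findA_inner_ok ts te c rest _ hrest, List.filterMap_cons, collectF, if_neg hc]

theorem findA_outer_ok (ents : List (String × List (Int × Int))) (ts te : Int) :
    ∀ (keys : List String) (acc : List (String × Int)),
    (∀ c ∈ keys, ∀ p ∈ entGet ents c,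
      (ts ≥ p.1 ∧ te ≤ p.2) ∨
      ¬((ts ≤ p.1 ∧ te ≥ p.2) ∨ (ts ≤ p.1 ∧ te > p.1) ∨ (ts < p.2 ∧ te > p.2))) →
    findA_outer ents ts te keys acc =
      some (acc ++ keys.flatMap (fun c =>
        (PySem.List.enumerate (entGet ents c)).filterMap (collectF ts te c)))
  | [], acc, _ => by simp [findA_outer]
  | c :: rest, acc, h => by
    have hc : ∀ q ∈ PySem.List.enumerate (entGet ents c), (ts ≥ q.2.1 ∧ te ≤ q.2.2) ∨
        ¬((ts ≤ q.2.1 ∧ te ≥ q.2.2) ∨ (ts ≤ q.2.1 ∧ te > q.2.1) ∨ (ts < q.2.2 ∧ te > q.2.2)) := by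
      intro q hq
      rcases (PySem.List.mem_enumerate_iff _ _ _).1 hq with ⟨k, hk, rfl⟩
      exact h c (by simp) _ (List.getElem_mem hk)
    have hrest : ∀ c' ∈ rest, ∀ p ∈ entGet ents c', _ := fun c' hc' => h c' (by simp [hc'])
    simp only [findA_outer, findA_inner_ok ts te c _ acc hc,
      findA_outer_ok ents ts te rest _ hrest, List.flatMap_cons]
    simp

-- STABILITY of PySem's insertion sort: a pairwise property that only involves key-tied pairs survives sorting.
theorem insertBy_stable {α κ : Type} [LinearOrder κ] (key : α → κ) (R : α → α → Prop) (x : α) :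
    ∀ acc : List α, acc.Pairwise (fun a b => key a ≤ key b) →
      acc.Pairwise (fun a b => key a = key b → R a b) →
      (∀ y ∈ acc, key y = key x → R y x) →
      (PySem.List.insertBy (fun a b => decide (key a < key b)) x acc).Pairwise (fun a b => key a ≤ key b) ∧
      (PySem.List.insertBy (fun a b => decide (key a < key b)) x acc).Pairwise (fun a b => key a = key b → R a b)
  | [], _, _, _ => by simp [PySem.List.insertBy]
  | y :: ys, hle, hQ, htie => by
    by_cases hxy : key x < key y
    · simp only [PySem.List.insertBy, hxy, decide_true, if_true]
      constructor
      · exact List.Pairwise.cons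
          (fun z hz => by
            rcases List.mem_cons.1 hz with rfl | hz
            · exact le_of_lt hxy
            · exact le_trans (le_of_lt hxy) ((List.pairwise_cons.1 hle).1 z hz)) hle
      · exact List.Pairwise.cons
          (fun z hz heq => by
            rcases List.mem_cons.1 hz with rfl | hz
            · exact absurd heq (ne_of_lt hxy)
            · exact absurd heq (ne_of_lt (lt_of_lt_of_le hxy ((List.pairwise_cons.1 hle).1 z hz)))) hQ
    · have hyx : key y ≤ key x := le_of_not_gt hxy
      obtain ⟨hle1, hle2⟩ := List.pairwise_cons.1 hle
      obtain ⟨hQ1, hQ2⟩ := List.pairwise_cons.1 hQ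
      have ih := insertBy_stable key R x ys hle2 hQ2
        (fun z hz => htie z (List.mem_cons_of_mem _ hz))
      simp only [PySem.List.insertBy, hxy, decide_false, Bool.false_eq_true, if_false]
      constructor
      · refine List.Pairwise.cons (fun z hz => ?_) ih.1
        rcases (PySem.List.mem_insertBy _ _ _ _).1 hz with rfl | hz
        · exact hyx
        · exact hle1 z hz
      · refine List.Pairwise.cons (fun z hz heq => ?_) ih.2
        rcases (PySem.List.mem_insertBy _ _ _ _).1 hz with rfl | hz
        · exact htie y (List.mem_cons_self) heq
        · exact hQ1 z hz heq

theorem foldl_insertBy_stable {α κ : Type} [LinearOrder κ] (key : α → κ) (R : α → α → Prop) :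
    ∀ (xs acc : List α), acc.Pairwise (fun a b => key a ≤ key b) →
      acc.Pairwise (fun a b => key a = key b → R a b) →
      (∀ y ∈ acc, ∀ x ∈ xs, key y = key x → R y x) →
      xs.Pairwise (fun a b => key a = key b → R a b) →
      (xs.foldl (fun acc x => PySem.List.insertBy (fun a b => decide (key a < key b)) x acc) acc).Pairwise
        (fun a b => key a = key b → R a b)
  | [], acc, _, hQ, _, _ => hQ
  | x :: rest, acc, hle, hQ, hcross, hxs => by
    obtain ⟨hx1, hx2⟩ := List.pairwise_cons.1 hxs
    have hins := insertBy_stable key R x acc hle hQ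
      (fun y hy => hcross y hy x (List.mem_cons_self))
    simp only [List.foldl_cons]
    refine foldl_insertBy_stable key R rest _ hins.1 hins.2 (fun y hy z hz => ?_) hx2
    rcases (PySem.List.mem_insertBy _ _ _ _).1 hy with rfl | hy
    · exact hx1 z hz
    · exact hcross y hy z (List.mem_cons_of_mem _ hz)

theorem sorted_stable {α κ : Type} [LinearOrder κ] (key : α → κ) (R : α → α → Prop)
    (xs : List α) (h : xs.Pairwise (fun a b => key a = key b → R a b)) :
    (PySem.List.sorted xs key false).Pairwise (fun a b => key a = key b → R a b) := by
  rw [PySem.List.sorted_eq_foldl_insertBy]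
  exact foldl_insertBy_stable key R xs [] (by simp) (by simp) (by simp) h

-- indices are strictly increasing along enumerate
theorem enumerate_pairwise_fst {α : Type} :
    ∀ (xs : List α) (s : Int), (PySem.List.enumerate xs s).Pairwise (fun a b => a.1 < b.1)
  | [], _ => by simp [PySem.List.enumerate_nil]
  | x :: xs, s => by
    rw [PySem.List.enumerate_cons]
    refine List.Pairwise.cons (fun z hz => ?_) (enumerate_pairwise_fst xs (s + 1))
    rcases (PySem.List.mem_enumerate_iff _ _ _).1 hz with ⟨k, hk, rfl⟩
    simp; omega

-- membership facts for the flat list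
theorem mem_flatItems (ents : List (String × List (Int × Int)))
    (q : Int × String × Int × Int) (hq : q ∈ flatItems ents) :
    q.2.1 ∈ PySem.List.dedup (ents.map (·.1)) ∧
    (q.1, q.2.2.1) ∈ entGet ents q.2.1 ∧
    PySem.List.pyGetD (entGet ents q.2.1) q.2.2.2 (0, 0) = (q.1, q.2.2.1) := by
  rcases List.mem_flatMap.1 hq with ⟨c, hc, hq2⟩
  rcases List.mem_map.1 hq2 with ⟨p, hp, rfl⟩
  rcases (PySem.List.mem_enumerate_iff _ _ _).1 hp with ⟨k, hk, rfl⟩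
  refine ⟨hc, List.getElem_mem hk, ?_⟩
  simp only [zero_add]
  rw [PySem.List.pyGetD_natCast]
  exact List.getD_eq_getElem _ _ hk

theorem gB_eq_some (ts te : Int) (q : Int × String × Int × Int) (u : String × Int)
    (h : gB ts te q = some u) : u = (q.2.1, q.2.2.2) ∧ ts ≥ q.1 ∧ te ≤ q.2.2.1 := by
  unfold gB at h
  by_cases hc : ts ≥ q.1 ∧ te ≤ q.2.2.1
  · rw [if_pos hc] at h
    exact ⟨(Option.some.inj h).symm, hc⟩
  · rw [if_neg hc] at h
    cases h

-- the scan succeeds and is the filterMap when every record is contained-or-disjoint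
theorem scanB_ok (ts te : Int) :
    ∀ l : List (Int × String × Int × Int),
    (∀ q ∈ l, (ts ≥ q.1 ∧ te ≤ q.2.2.1) ∨ (te ≤ q.1 ∨ ts ≥ q.2.2.1)) →
    scanB ts te l = some (l.filterMap (gB ts te))
  | [], _ => by simp [scanB]
  | (s, c, e, i) :: rest, h => by
    have hrest := scanB_ok ts te rest (fun q hq => h q (List.mem_cons_of_mem _ hq))
    have hhd := h (s, c, e, i) (List.mem_cons_self)
    by_cases hc : ts ≥ s ∧ te ≤ e
    · simp [scanB, hc, hrest, gB]
    · have hd : te ≤ s ∨ ts ≥ e := by rcases hhd with h1 | h1; exact absurd h1 hc; exact h1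
      simp only [scanB, if_neg hc, if_neg (not_not.2 hd), hrest, List.filterMap_cons, gB]

-- key arithmetic on the Lex products
theorem key3_eq_iff (ents : List (String × List (Int × Int))) (a b : String × Int) :
    sortKey ents a = sortKey ents b ↔
      (PySem.List.pyGetD (entGet ents a.1) a.2 (0, 0)).1 = (PySem.List.pyGetD (entGet ents b.1) b.2 (0, 0)).1 ∧
      a.1 = b.1 ∧
      (PySem.List.pyGetD (entGet ents a.1) a.2 (0, 0)).2 = (PySem.List.pyGetD (entGet ents b.1) b.2 (0, 0)).2 := by
  simp only [sortKey, toLex_inj, Prod.mk.injEq]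

theorem key3_lt_key4_lt (ents : List (String × List (Int × Int))) (a b : String × Int)
    (h : sortKey ents a < sortKey ents b) : sortKey4 ents a < sortKey4 ents b := by
  unfold sortKey at h
  unfold sortKey4
  rw [Prod.Lex.toLex_lt_toLex] at h ⊢
  rcases h with h | ⟨h1, h2⟩
  · exact Or.inl h
  · refine Or.inr ⟨h1, ?_⟩
    rw [Prod.Lex.toLex_lt_toLex] at h2 ⊢
    rcases h2 with h2 | ⟨h2, h3⟩
    · exact Or.inl h2
    · exact Or.inr ⟨h2, Prod.Lex.toLex_lt_toLex.2 (Or.inl h3)⟩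

theorem tupKey_inj (q q' : Int × String × Int × Int) (h : tupKey q = tupKey q') : q = q' := by
  unfold tupKey at h
  rw [toLex_inj, Prod.mk.injEq, toLex_inj, Prod.mk.injEq, toLex_inj, Prod.mk.injEq] at h
  obtain ⟨h1, h2, h3, h4⟩ := h
  exact Prod.ext h1 (Prod.ext h2 (Prod.ext h3 h4))

-- found: the collected list in A's traversal order
def foundOf (ents : List (String × List (Int × Int))) (ts te : Int) : List (String × Int) :=
  (sortedClasses ents).flatMap (fun c =>
    (PySem.List.enumerate (entGet ents c)).filterMap (collectF ts te c))

theorem mem_collect_class (ts te : Int) (c : String) (l : List (Int × (Int × Int)))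
    (u : String × Int) (hu : u ∈ l.filterMap (collectF ts te c)) : u.1 = c := by
  rcases List.mem_filterMap.1 hu with ⟨q, _, hq⟩
  unfold collectF at hq
  split at hq
  · cases hq; rfl
  · exact absurd hq (by simp)

-- Key stability fact about A's collected list: tied 3-keys only occur within one class, in index order.
theorem foundOf_pairwise (ents : List (String × List (Int × Int))) (ts te : Int) :
    (foundOf ents ts te).Pairwise
      (fun a b => sortKey ents a = sortKey ents b → sortKey4 ents a < sortKey4 ents b) := by
  unfold foundOf
  rw [List.pairwise_flatMap]
  constructor
  · intro c _
    rw [List.pairwise_filterMap]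
    have := enumerate_pairwise_fst (entGet ents c) 0
    refine this.imp_of_mem (fun {p} {p'} hp hp' hlt => ?_)
    intro u hu u' hu' heq
    unfold collectF at hu hu'
    split at hu
    · split at hu'
      · cases hu; cases hu'
        rcases (key3_eq_iff ents _ _).1 heq with ⟨h1, _, h3⟩
        unfold sortKey4
        rw [Prod.Lex.toLex_lt_toLex]
        refine Or.inr ⟨h1, ?_⟩
        rw [Prod.Lex.toLex_lt_toLex]
        refine Or.inr ⟨rfl, ?_⟩
        rw [Prod.Lex.toLex_lt_toLex]
        exact Or.inr ⟨h3, hlt⟩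
      · exact absurd hu' (by simp)
    · exact absurd hu (by simp)
  · have hnd : (sortedClasses ents).Nodup :=
      ((PySem.List.sorted_perm _ _ _).nodup_iff).2 (PySem.List.nodup_dedup _)
    refine hnd.imp_of_mem (fun {c} {d} _ _ hne => ?_)
    intro u hu v hv heq
    have h1 := mem_collect_class ts te c _ u hu
    have h2 := mem_collect_class ts te d _ v hv
    rcases (key3_eq_iff ents _ _).1 heq with ⟨_, hcd, _⟩
    exact absurd (h1 ▸ h2 ▸ hcd) hne

-- the flat list has no duplicate records
theorem flatItems_nodup (ents : List (String × List (Int × Int))) : (flatItems ents).Nodup := by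
  unfold flatItems
  show List.Pairwise _ _
  rw [List.pairwise_flatMap]
  constructor
  · intro c _
    rw [List.pairwise_map]
    exact (enumerate_pairwise_fst (entGet ents c) 0).imp_of_mem
      (fun {p} {p'} _ _ hlt => by simp; omega)
  · refine (PySem.List.nodup_dedup _).imp_of_mem (fun {c} {d} _ _ hne => ?_)
    intro u hu v hv
    rcases List.mem_map.1 hu with ⟨p, _, rfl⟩
    rcases List.mem_map.1 hv with ⟨p', _, rfl⟩
    simp only [ne_eq, Prod.mk.injEq, not_and]
    intro _ h
    exact absurd h hne

-- B's scanned list, pairwise strictly increasing in tuple order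
theorem sortedItems_pairwise_lt (ents : List (String × List (Int × Int))) :
    (PySem.List.sorted (flatItems ents) tupKey false).Pairwise (fun a b => tupKey a < tupKey b) := by
  have hle := PySem.List.sorted_pairwise (flatItems ents) tupKey
  have hnd : (PySem.List.sorted (flatItems ents) tupKey false).Nodup :=
    ((PySem.List.sorted_perm _ _ _).nodup_iff).2 (flatItems_nodup ents)
  exact (hle.and hnd).imp (fun {a} {b} ⟨h1, h2⟩ =>
    lt_of_le_of_ne h1 (fun he => h2 (tupKey_inj _ _ he)))

-- the result of the scan is a permutation of A's collected list …
theorem scan_filterMap_perm (ents : List (String × List (Int × Int))) (ts te : Int) :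
    ((PySem.List.sorted (flatItems ents) tupKey false).filterMap (gB ts te)).Perm (foundOf ents ts te) := by
  refine ((PySem.List.sorted_perm (flatItems ents) tupKey false).filterMap (gB ts te)).trans ?_
  have heq : (flatItems ents).filterMap (gB ts te) =
      (PySem.List.dedup (ents.map (·.1))).flatMap (fun c =>
        (PySem.List.enumerate (entGet ents c)).filterMap (collectF ts te c)) := by
    unfold flatItems
    rw [List.filterMap_flatMap]
    refine List.flatMap_congr (fun c _ => ?_)
    rw [List.filterMap_map]
    rfl
  rw [heq]
  exact (PySem.List.sorted_perm (PySem.List.dedup (ents.map (·.1))) (fun s => s) false).symm.flatMap_right _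

-- … and strictly increasing in B's 4-component key
theorem scan_filterMap_pairwise (ents : List (String × List (Int × Int))) (ts te : Int) :
    ((PySem.List.sorted (flatItems ents) tupKey false).filterMap (gB ts te)).Pairwise
      (fun a b => sortKey4 ents a < sortKey4 ents b) := by
  rw [List.pairwise_filterMap]
  refine (sortedItems_pairwise_lt ents).imp_of_mem (fun {q} {q'} hq hq' hlt => ?_)
  intro u hu u' hu'
  obtain ⟨rfl, hc1, hc2⟩ := gB_eq_some ts te q u hu
  obtain ⟨rfl, hc1', hc2'⟩ := gB_eq_some ts te q' u' hu'
  have hm := mem_flatItems ents q ((PySem.List.mem_sorted _ _ _ _).1 hq)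
  have hm' := mem_flatItems ents q' ((PySem.List.mem_sorted _ _ _ _).1 hq')
  have e1 : sortKey4 ents (q.2.1, q.2.2.2) = tupKey q := by
    unfold sortKey4 tupKey
    rw [hm.2.2]
  have e1' : sortKey4 ents (q'.2.1, q'.2.2.2) = tupKey q' := by
    unfold sortKey4 tupKey
    rw [hm'.2.2]
  rw [e1, e1']
  exact hlt

theorem find_entity_for_token_spec' (text : String) (ts te : Int)
    (ents : List (String × List (Int × Int)))
    (hpre : Pre_find_entity_for_token text ts te ents) :
    find_entity_for_token text ts te ents = find_entity_for_token_alt text ts te ents := by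
  have hkeys : ∀ c ∈ sortedClasses ents, ∀ p ∈ entGet ents c,
      (ts ≥ p.1 ∧ te ≤ p.2) ∨
      ¬((ts ≤ p.1 ∧ te ≥ p.2) ∨ (ts ≤ p.1 ∧ te > p.1) ∨ (ts < p.2 ∧ te > p.2)) := by
    intro c hc
    exact hpre c ((PySem.List.mem_sorted _ _ _ _).1 hc)
  -- A's side: the collected list then sorted by the 3-key
  have hA : find_entity_for_token text ts te ents =
      PySem.List.sorted (foundOf ents ts te) (sortKey ents) false := by
    unfold find_entity_for_token
    rw [findA_outer_ok ents ts te (sortedClasses ents) [] hkeys]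
    simp only [List.nil_append]
    by_cases hlen : (foundOf ents ts te).length > 0
    · rw [if_pos]; rfl; exact hlen
    · have h0 : foundOf ents ts te = [] := List.length_eq_zero_iff.mp (by omega)
      unfold foundOf at h0 ⊢
      rw [if_neg]
      · rw [h0, (PySem.List.sorted_eq_nil_iff _ _ _).2 rfl]
      · unfold foundOf at hlen; exact hlen
  -- B's side: the scan succeeds
  have hok : ∀ q ∈ PySem.List.sorted (flatItems ents) tupKey false,
      (ts ≥ q.1 ∧ te ≤ q.2.2.1) ∨ (te ≤ q.1 ∨ ts ≥ q.2.2.1) := by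
    intro q hq
    have hm := mem_flatItems ents q ((PySem.List.mem_sorted _ _ _ _).1 hq)
    have := hpre q.2.1 hm.1 (q.1, q.2.2.1) hm.2.1
    rcases this with h1 | h1
    · exact Or.inl h1
    · omega
  have hB : find_entity_for_token_alt text ts te ents =
      (PySem.List.sorted (flatItems ents) tupKey false).filterMap (gB ts te) := by
    unfold find_entity_for_token_alt
    rw [scanB_ok ts te _ hok]
  -- stability: A's stable 3-key sort equals the 4-key sort of the same list
  have hstab : PySem.List.sorted (foundOf ents ts te) (sortKey ents) false =
      PySem.List.sorted (foundOf ents ts te) (sortKey4 ents) false := by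
    refine (PySem.List.sorted_eq_of_perm_of_pairwise_lt _ _ (sortKey4 ents)
      (PySem.List.sorted_perm _ _ _) ?_).symm
    have h1 := PySem.List.sorted_pairwise (foundOf ents ts te) (sortKey ents)
    have h2 := sorted_stable (sortKey ents) (fun a b => sortKey4 ents a < sortKey4 ents b)
      (foundOf ents ts te) (foundOf_pairwise ents ts te)
    refine (h1.and h2).imp (fun {a} {b} ⟨hle, htie⟩ => ?_)
    rcases lt_or_eq_of_le hle with h | h
    · exact key3_lt_key4_lt ents a b h
    · exact htie h
  -- B's output is exactly the 4-key sort of A's collected list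
  have hBsort : PySem.List.sorted (foundOf ents ts te) (sortKey4 ents) false =
      (PySem.List.sorted (flatItems ents) tupKey false).filterMap (gB ts te) :=
    PySem.List.sorted_eq_of_perm_of_pairwise_lt _ _ (sortKey4 ents)
      (scan_filterMap_perm ents ts te) (scan_filterMap_pairwise ents ts te)
  rw [hA, hB, hstab, hBsort]

-- ===== VERDICT (by name: the statement is the Claim_ definition above) =====
theorem find_entity_for_token_spec : Claim_equal_find_entity_for_token := by
  intro text ts te ents _ hpre
  exact find_entity_for_token_spec' text ts te ents hpre
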